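-- pv_equiv track=rewrite | github.com/ChengqiLiu/CS120 | Project/4/node1.py | EmptyParityBits
-- ===== SOURCE A (Python) =====
-- def NParity(length):
--     i=0
--     pow=1
--     while pow<=length+i:
--         i+=1
--         pow*=2
--     return i
--
-- def EmptyParityBits(data,length):
--     n=NParity(length)
--     i=0 #loop counter
--     j=0 #parity bits number
--     k=0 #data bits number
--     pow=1 #2**j
--     list1=list()
--     while i <n+length:
--         if i== pow-1:
--             list1.insert(i,0)
--             j+=1
--             pow*=2
--         else:
--             list1.insert(i,int(data[k]))
--             k+=1
--         i+=1
--     return list1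
-- ===== SOURCE B (Python) =====
-- def NParity(length):
--     i = 0
--     pow = 1
--     while pow <= length + i:
--         i += 1
--         pow *= 2
--     return i
--
-- def EmptyParityBits(data, length):
--     n = NParity(length)
--     # pass 1: all data bits in order
--     result = [int(data[k]) for k in range(length)]
--     # pass 2: insert a zero placeholder at each parity position 0,1,3,7,... below n+length
--     p = 1
--     while p - 1 < n + length:
--         result.insert(p - 1, 0)
--         p *= 2
--     return result
-- ===== Notes on version B (the rewrite author's own statement) =====
-- stated objective: alternative
-- what changed: A interleaves parity placeholders and data conversion in one stateful loop with four counters; B separates concerns: one pass converts all data bits, then a second pass inserts a zero at each parity position 2**j-1 below n+length.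
import Mathlib
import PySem

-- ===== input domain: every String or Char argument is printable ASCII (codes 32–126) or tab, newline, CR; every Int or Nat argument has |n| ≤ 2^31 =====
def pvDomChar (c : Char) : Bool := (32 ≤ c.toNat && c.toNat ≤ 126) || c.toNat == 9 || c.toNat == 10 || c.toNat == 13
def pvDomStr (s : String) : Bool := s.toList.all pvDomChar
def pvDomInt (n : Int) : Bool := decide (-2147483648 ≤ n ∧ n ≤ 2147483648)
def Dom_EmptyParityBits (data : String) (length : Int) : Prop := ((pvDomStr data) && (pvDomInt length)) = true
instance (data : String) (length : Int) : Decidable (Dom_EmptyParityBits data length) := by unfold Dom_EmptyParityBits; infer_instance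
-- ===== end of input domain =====

-- B replaces A's single interleaved four-counter loop by two separate passes (convert all data
-- bits, then insert a zero at each parity position); the return values are proved equal on Pre_.

-- ===== PORT A =====

-- NParity's while loop; the Nat fuel is only a totality guard (64 suffices for |length| ≤ 2^31,
-- proved below from Dom); the loop condition is checked literally at each step.
def NParityGo (length : Int) : Nat → Int → Int → Int
  | 0, i, _ => i
  | f + 1, i, pow => if pow ≤ length + i then NParityGo length f (i + 1) (pow * 2) else i

def NParity (length : Int) : Int := NParityGo length 64 0 1

-- int(data[k]): where Python raises (IndexError / ValueError) the option is none and we take 0;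
-- such inputs are excluded by Pre_.
def pyDigitAt (data : String) (k : Int) : Int :=
  ((PySem.Str.pyGet? data k).bind (fun c => PySem.Int.ofChars? [c])).getD 0

-- A's main while loop, literal: state (i, j, k, pow, list1); the fuel is a totality guard.
def EPBGoA (data : String) (stop : Int) : Nat → Int → Int → Int → Int → List Int → List Int
  | 0, _, _, _, _, l => l
  | f + 1, i, j, k, pow, l =>
    if i < stop then
      if i = pow - 1 then
        EPBGoA data stop f (i + 1) (j + 1) k (pow * 2) (PySem.List.insert l i 0)
      else
        EPBGoA data stop f (i + 1) j (k + 1) pow (PySem.List.insert l i (pyDigitAt data k))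
    else l

def EmptyParityBits (data : String) (length : Int) : List Int :=
  let n := NParity length
  EPBGoA data (n + length) ((n + length).toNat + 1) 0 0 0 1 []

-- ===== PORT B =====

-- B's insertion pass: while p - 1 < stop: result.insert(p-1, 0); p *= 2.  Fuel = totality guard.
def EPBInsB (stop : Int) : Nat → Int → List Int → List Int
  | 0, _, l => l
  | f + 1, p, l =>
    if p - 1 < stop then EPBInsB stop f (p * 2) (PySem.List.insert l (p - 1) 0) else l

def EmptyParityBits_alt (data : String) (length : Int) : List Int :=
  let n := NParity length
  let result := (PySem.List.pyRange 0 length 1).map (fun k => pyDigitAt data k)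
  EPBInsB (n + length) (n.toNat + 1) 1 result

-- ===== PRECONDITION & SPEC =====
-- Pre_ excludes exactly the inputs on which Python A raises: an IndexError when data has fewer
-- than `length` characters, or a ValueError when one of the first `length` characters is not a
-- decimal digit (int(data[k]) fails).
def Pre_EmptyParityBits (data : String) (length : Int) : Prop :=
  length ≤ (data.length : Int) ∧ (data.toList.take length.toNat).all Char.isDigit = true
instance (data : String) (length : Int) : Decidable (Pre_EmptyParityBits data length) := by
  unfold Pre_EmptyParityBits; infer_instance

def pvWitness_EmptyParityBits : String × Int := ("1011", 4)

def Spec_EmptyParityBits (data : String) (length : Int) (out : List Int) : Prop := out = EmptyParityBits_alt data length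
instance (data : String) (length : Int) (out : List Int) : Decidable (Spec_EmptyParityBits data length out) := by unfold Spec_EmptyParityBits; infer_instance

-- ===== CLAIM (what is proved, stated in full; the proofs are below) =====
def Claim_equal_EmptyParityBits : Prop := ∀ (data : String) (length : Int), Dom_EmptyParityBits data length → Pre_EmptyParityBits data length → Spec_EmptyParityBits data length (EmptyParityBits data length)

-- ===== LEMMAS AND PROOFS =====

-- NParityGo returns, at adequate fuel, the least r ≥ i with length + r < 2^r (Python's NParity).
theorem NParityGo_spec (length : Int) :
    ∀ (f i : Nat), length + (i + f : Nat) < 2 ^ (i + f) →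
      ∃ r : Nat, NParityGo length f (i : Int) ((2 : Int) ^ i) = (r : Int) ∧ i ≤ r ∧
        length + r < (2 : Int) ^ r ∧ ∀ t : Nat, i ≤ t → t < r → (2 : Int) ^ t ≤ length + t := by
  intro f
  induction f with
  | zero =>
    intro i h
    simp only [Nat.add_zero] at h
    exact ⟨i, rfl, le_refl _, h, fun t h1 h2 => absurd (lt_of_le_of_lt h1 h2) (lt_irrefl _)⟩
  | succ f ih =>
    intro i h
    by_cases hc : (2 : Int) ^ i ≤ length + i
    · have h' : length + ((i + 1) + f : Nat) < 2 ^ ((i + 1) + f) := by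
        have : (i + 1) + f = i + (f + 1) := by omega
        rw [this]; exact_mod_cast h
      obtain ⟨r, hr, hir, hlr, hall⟩ := ih (i + 1) h'
      refine ⟨r, ?_, by omega, hlr, ?_⟩
      · simp only [NParityGo, if_pos hc]
        have e1 : ((i : Int) + 1) = ((i + 1 : Nat) : Int) := by push_cast; ring
        have e2 : ((2 : Int) ^ i * 2) = (2 : Int) ^ (i + 1) := by ring
        rw [e1, e2]; exact hr
      · intro t h1 h2
        rcases Nat.eq_or_lt_of_le h1 with h1 | h1
        · subst h1; exact hc
        · exact hall t h1 h2
    · refine ⟨i, ?_, le_refl _, by omega, fun t h1 h2 => absurd (lt_of_le_of_lt h1 h2) (lt_irrefl _)⟩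
      simp only [NParityGo, if_neg hc]

-- inserting at exactly the length of a prefix splices the value between prefix and rest
theorem insert_mid (acc rest : List Int) (v : Int) :
    PySem.List.insert (acc ++ rest) ((acc.length : Int)) v = acc ++ v :: rest := by
  rw [PySem.List.insert_natCast _ _ _ (by simp)]
  simp

-- the heart: A's interleaved loop from a mid-state equals B's insertion pass applied to the
-- current prefix followed by the remaining converted data bits
theorem loop_eq (data : String) (length : Int) (nn : Nat)
    (hlt : ∀ t : Nat, t < nn → (2 : Int) ^ t ≤ length + t)
    (hn : length + nn < (2 : Int) ^ nn) :
    ∀ (fA : Nat) (jn kn : Nat) (acc : List Int) (fB : Nat),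
      ((nn : Int) + length - ((jn : Int) + kn)).toNat < fA →
      acc.length = jn + kn →
      ((jn : Int) + kn) ≤ 2 ^ jn - 1 →
      jn ≤ nn →
      nn - jn < fB →
      EPBGoA data ((nn : Int) + length) fA ((jn : Int) + kn) jn kn ((2 : Int) ^ jn) acc =
        EPBInsB ((nn : Int) + length) fB ((2 : Int) ^ jn)
          (acc ++ (PySem.List.pyRange (kn : Int) length 1).map (fun k => pyDigitAt data k)) := by
  intro fA
  induction fA with
  | zero => intro jn kn acc fB hfA; omega
  | succ fA ih =>
    intro jn kn acc fB hfA hacc hle hjn hfB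
    by_cases hstop : ((jn : Int) + kn) < (nn : Int) + length
    · rw [EPBGoA, if_pos hstop]
      by_cases hpar : ((jn : Int) + kn) = (2 : Int) ^ jn - 1
      · -- parity step: A appends 0 at i = 2^jn - 1 = acc.length; B's next insert fires there
        have hjlt : jn < nn := by
          by_contra hcon
          have : jn = nn := by omega
          subst this
          omega
        rw [if_pos hpar]
        obtain ⟨fB', rfl⟩ : ∃ fB', fB = fB' + 1 := ⟨fB - 1, by omega⟩
        rw [EPBInsB, if_pos (by omega)]
        have hpos : (2 : Int) ^ jn - 1 = (acc.length : Int) := by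
          rw [hacc]; push_cast; omega
        have hB : PySem.List.insert
            (acc ++ (PySem.List.pyRange (kn : Int) length 1).map (fun k => pyDigitAt data k))
            ((2 : Int) ^ jn - 1) 0 =
            (acc ++ [0]) ++ (PySem.List.pyRange (kn : Int) length 1).map (fun k => pyDigitAt data k) := by
          rw [hpos, insert_mid]; simp
        have hA : PySem.List.insert acc ((jn : Int) + kn) 0 = acc ++ [0] := by
          have : ((jn : Int) + kn) = (acc.length : Int) := by omega
          rw [this]
          simpa using insert_mid acc [] 0
        rw [hA, hB]
        have e1 : ((jn : Int) + kn) + 1 = ((jn + 1 : Nat) : Int) + kn := by push_cast; ring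
        have e2 : ((jn : Int)) + 1 = ((jn + 1 : Nat) : Int) := by push_cast; ring
        have e3 : (2 : Int) ^ jn * 2 = (2 : Int) ^ (jn + 1) := by ring
        rw [e1, e2, e3]
        exact ih (jn + 1) kn (acc ++ [0]) fB' (by push_cast at hfA ⊢; omega)
          (by simp [hacc]; omega)
          (by push_cast at hpar ⊢
              have h2 : (0 : Int) < 2 ^ jn := by positivity
              have : (2 : Int) ^ (jn + 1) = 2 ^ jn * 2 := by ring
              omega)
          (by omega) (by omega)
      · -- data step: A appends int(data[k]) at i = acc.length; B's data list loses its head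
        have hklen : (kn : Int) < length := by
          by_cases hjn' : jn < nn
          · have := hlt jn hjn'
            omega
          · have : jn = nn := by omega
            subst this
            omega
        rw [if_neg hpar]
        have e1 : ((jn : Int) + kn) + 1 = (jn : Int) + ((kn + 1 : Nat) : Int) := by push_cast; ring
        have e2 : ((kn : Int)) + 1 = ((kn + 1 : Nat) : Int) := by push_cast; ring
        have hA : PySem.List.insert acc ((jn : Int) + kn) (pyDigitAt data kn) = acc ++ [pyDigitAt data kn] := by
          have : ((jn : Int) + kn) = (acc.length : Int) := by omega
          rw [this]
          simpa using insert_mid acc [] (pyDigitAt data kn)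
        have hD : (PySem.List.pyRange (kn : Int) length 1).map (fun k => pyDigitAt data k) =
            pyDigitAt data kn :: (PySem.List.pyRange (((kn + 1 : Nat)) : Int) length 1).map (fun k => pyDigitAt data k) := by
          rw [PySem.List.pyRange_one_cons hklen]; push_cast; simp
        rw [hA, e1, e2, hD]
        rw [ih jn (kn + 1) (acc ++ [pyDigitAt data kn]) fB (by push_cast at hfA ⊢; omega)
          (by simp [hacc]; omega) (by push_cast at hle ⊢; omega) hjn hfB]
        simp
    · -- loop over: k ≥ length so B's data list is exhausted, and B's next insert is out of range
      rw [EPBGoA, if_neg hstop]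
      have hrange : PySem.List.pyRange (kn : Int) length 1 = [] :=
        PySem.List.pyRange_one_eq_nil (by omega)
      obtain ⟨fB', rfl⟩ : ∃ fB', fB = fB' + 1 := ⟨fB - 1, by omega⟩
      rw [EPBInsB, if_neg (by omega)]
      simp [hrange]

-- ===== VERDICT (by name: the statement is the Claim_ definition above) =====
theorem EmptyParityBits_spec : Claim_equal_EmptyParityBits := by
  intro data length hDom _hPre
  unfold Spec_EmptyParityBits EmptyParityBits EmptyParityBits_alt
  have hbound : -2147483648 ≤ length ∧ length ≤ 2147483648 := by
    unfold Dom_EmptyParityBits at hDom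
    rw [Bool.and_eq_true] at hDom
    have := hDom.2
    simpa [pvDomInt] using this
  obtain ⟨nn, hnn, -, hn, hlt0⟩ := NParityGo_spec length 64 0 (by norm_num; omega)
  have hnp : NParity length = (nn : Int) := by
    unfold NParity
    simpa using hnn
  rw [hnp]
  have hlt : ∀ t : Nat, t < nn → (2 : Int) ^ t ≤ length + t :=
    fun t ht => hlt0 t (Nat.zero_le _) ht
  have := loop_eq data length nn hlt hn (((nn : Int) + length).toNat + 1) 0 0 [] (nn + 1)
    (by omega) (by simp) (by norm_num) (by omega) (by omega)
  simpa using this
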